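-- pv_equiv track=rewrite | github.com/vinostroud/PDI_Bytes | bite54 ReformatText.py | print_hanging_indents
-- ===== SOURCE A (Python) =====
-- INDENTS = 4
--
-- def print_hanging_indents(poem):
--     paragraphs = [p.strip() for p in poem.split('\n\n') if p.strip()]  # Split paragraphs, removing empty lines
--     # \n\n identifies paragraphs in multiline; this is where poem is now split (split()) into paragraphs
--     #'p' represents each paragraph as a string
--     #strip() removes the leading and trailing whitespaces from the string
--     '''by using if p.strip(), we are checking if the stripped version of the paragraph is non-empty. If a paragraph
--     contains only whitespace (empty lines), it will be considered empty and not included in the paragraphs list.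
--     this thusly eliminates the \n the appears at the beginning of a multiline string such as remember_unformatted'''
--     #paragraphs thus is a list of each line with '\n' in betwen each line, but not at the beginning
--
--
--     formatted_paragraphs = []
--
--     for paragraph in paragraphs:
--         lines= paragraph.split('\n') #splits paragraphs at \n, so there is now a list per paragraph
--
--         cleaned_lines = [line.lstrip() for line in lines]
--         #lstrip() removes spaces and tabs at the beginning of a string
--
--         formatted_lines = [cleaned_lines[0]] #we've now created an object composed of the first line with no indent/spaces
--
--         formatted_lines.extend([' ' * INDENTS + line for line in cleaned_lines[1:]])#now we add four spaces to all lines after the first line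
--
--         formatted_paragraphs.append('\n'.join(formatted_lines)) #now we add the properly formatted lines to the empty list
--
--
--     formatted_text = '\n\n'.join(formatted_paragraphs) #now we've created a string, but there is a space in between the paragraphs
--
--     formatted_text = '\n'.join(line for line in formatted_text.split('\n') if line.strip())
--     #this removes empty lines from the formatted_text string.
--     #formatted_text.split('\n')creates list of lines use \n as delimiter, so each line is an element
--     #'line for line...' The if line.strip() condition is used to filter out lines that are empty or
--     # contain only whitespace after stripping leading and trailing whitespace using .strip().
--     #'\n'.join(...): Finally, the generator expression is joined back together into a single
--     # string using '\n' (newline) as the separator.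
--
--     return formatted_text
-- ===== SOURCE B (Python) =====
-- INDENTS = 4
--
-- def print_hanging_indents(poem):
--     out = []
--     for p in poem.split('\n\n'):
--         sp = p.strip()
--         if not sp:
--             continue
--         ls = sp.split('\n')
--         out.append(ls[0])
--         for line in ls[1:]:
--             s = line.lstrip()
--             if s:
--                 out.append(' ' * INDENTS + s)
--     return '\n'.join(out)
-- ===== Notes on version B (the rewrite author's own statement) =====
-- stated objective: simpler
-- what changed: B appends output lines to one flat list in a single pass over the paragraphs (skipping blank body lines as it goes) instead of A's building per-paragraph indented strings, joining them with ' ', then re-splitting the whole text and filtering out blank lines in a second pass.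
import Mathlib
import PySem

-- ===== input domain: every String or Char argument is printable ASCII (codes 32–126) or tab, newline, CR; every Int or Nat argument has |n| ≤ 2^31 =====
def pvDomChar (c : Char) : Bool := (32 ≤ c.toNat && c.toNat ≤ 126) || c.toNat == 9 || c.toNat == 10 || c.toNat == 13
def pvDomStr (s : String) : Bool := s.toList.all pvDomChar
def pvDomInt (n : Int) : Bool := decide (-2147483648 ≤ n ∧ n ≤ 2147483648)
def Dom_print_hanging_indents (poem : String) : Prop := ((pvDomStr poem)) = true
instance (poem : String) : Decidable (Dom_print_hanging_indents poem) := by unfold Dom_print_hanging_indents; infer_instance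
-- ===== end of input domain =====

-- B builds the flat list of output lines in one pass (skipping blank body lines as it goes)
-- instead of A's per-paragraph strings joined with '\n\n' then re-split and filtered; return values proved equal.

def INDENTS : Int := 4

-- ===== PORT A =====
-- literal transliteration of A; strings are handled on .toList via PySem.Chars (Lean's own
-- String ops are kernel-opaque).  cleaned_lines[0] is total here because split never returns
-- an empty list, so Python's indexing cannot raise; ported as headD [].
def print_hanging_indents (poem : String) : String :=
  let paragraphs : List (List Char) :=
    ((PySem.Chars.splitOn poem.toList ['\n', '\n']).filter
        (fun p => !(PySem.Chars.strip p).isEmpty)).map PySem.Chars.strip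
  let formatted_paragraphs : List (List Char) :=
    paragraphs.foldl (fun acc paragraph =>
      let lines := PySem.Chars.splitOn paragraph ['\n']
      let cleaned_lines := lines.map PySem.Chars.lstrip
      let formatted_lines :=
        cleaned_lines.headD [] ::
          (cleaned_lines.drop 1).map (fun line => List.replicate INDENTS.toNat ' ' ++ line)
      acc ++ [PySem.Chars.join ['\n'] formatted_lines]) []
  let formatted_text := PySem.Chars.join ['\n', '\n'] formatted_paragraphs
  let formatted_text :=
    PySem.Chars.join ['\n']
      ((PySem.Chars.splitOn formatted_text ['\n']).filter
        (fun line => !(PySem.Chars.strip line).isEmpty))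
  String.ofList formatted_text

-- ===== PORT B =====
-- literal transliteration of Source B: one flat accumulator of output lines.
def print_hanging_indents_alt (poem : String) : String :=
  let out : List (List Char) :=
    (PySem.Chars.splitOn poem.toList ['\n', '\n']).foldl (fun out p =>
      let sp := PySem.Chars.strip p
      if sp.isEmpty then out
      else
        let ls := PySem.Chars.splitOn sp ['\n']
        let out := out ++ [ls.headD []]   -- ls[0]: split never returns [], so indexing is total
        (ls.drop 1).foldl (fun out line =>
          let s := PySem.Chars.lstrip line
          if s.isEmpty then out
          else out ++ [List.replicate INDENTS.toNat ' ' ++ s]) out) []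
  String.ofList (PySem.Chars.join ['\n'] out)

-- ===== PRECONDITION & SPEC =====
def Spec_print_hanging_indents (poem : String) (out : String) : Prop := out = print_hanging_indents_alt poem
instance (poem : String) (out : String) : Decidable (Spec_print_hanging_indents poem out) := by unfold Spec_print_hanging_indents; infer_instance

-- ===== CLAIM (what is proved, stated in full; the proofs are below) =====
def Claim_equal_print_hanging_indents : Prop := ∀ (poem : String), Dom_print_hanging_indents poem → Spec_print_hanging_indents poem (print_hanging_indents poem)

-- ===== LEMMAS AND PROOFS =====


-- ---- proof-only helpers ----

-- single-char split: PySem's fuel-based splitter agrees with Mathlib's List.splitOn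
theorem pv_go_single (c : Char) : ∀ (fuel : Nat) (l cur : List Char) (accs : List (List Char)),
    l.length ≤ fuel →
    PySem.Chars.splitOn.go [c] fuel l cur accs
      = accs.reverse ++ (l.splitOn c).modifyHead (fun h => cur.reverse ++ h) := by
  intro fuel
  induction fuel with
  | zero =>
    intro l cur accs hl
    have : l = [] := List.eq_nil_of_length_eq_zero (Nat.le_zero.mp hl)
    subst this
    simp [PySem.Chars.splitOn.go, List.splitOn]
  | succ n ih =>
    intro l cur accs hl
    cases l with
    | nil => simp [PySem.Chars.splitOn.go, List.splitOn]
    | cons x rest =>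
      rw [PySem.Chars.splitOn.go]
      by_cases hx : x = c
      · subst hx
        simp only [List.isPrefixOf, BEq.rfl, Bool.true_and, if_true]
        rw [ih _ [] (cur.reverse :: accs) (by simpa using Nat.lt_succ_iff.mp (by simpa using hl))]
        simp [List.splitOn, List.splitOnP_cons]
        obtain ⟨h, t, hs⟩ := List.exists_cons_of_ne_nil (List.splitOnP_ne_nil (· == x) rest)
        simp [hs]
      · have hpre : [c].isPrefixOf (x :: rest) = false := by
          simp [List.isPrefixOf]; exact fun h => absurd h.symm hx
        simp only [hpre, Bool.false_eq_true, if_false]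
        rw [ih rest (x :: cur) accs (by simpa using Nat.lt_succ_iff.mp (by simpa using hl))]
        simp only [List.splitOn, List.splitOnP_cons]
        have hxc : (x == c) = false := by simpa using hx
        simp only [hxc, Bool.false_eq_true, if_false]
        obtain ⟨h, t, hs⟩ := List.exists_cons_of_ne_nil (List.splitOnP_ne_nil (· == c) rest)
        simp [hs]

theorem pv_splitOn_single (c : Char) (s : List Char) :
    PySem.Chars.splitOn s [c] = s.splitOn c := by
  rw [PySem.Chars.splitOn, pv_go_single c (s.length + 1) s [] [] (by omega)]
  simp only [List.reverse_nil, List.nil_append]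
  show List.modifyHead id _ = _
  rw [List.modifyHead_id]
  rfl

-- chunks of a single-char split never contain the separator
theorem pv_splitOn_no_sep (c : Char) : ∀ (s : List Char), ∀ x ∈ s.splitOn c, c ∉ x := by
  intro s
  induction s with
  | nil => intro x hx; simp [List.splitOn] at hx; simp [hx]
  | cons a t ih =>
    intro x hx
    simp only [List.splitOn, List.splitOnP_cons] at hx ih
    by_cases hac : a = c
    · simp [hac] at hx
      rcases hx with h | h
      · simp [h]
      · exact ih x h
    · have : (a == c) = false := by simpa using hac
      simp only [this, Bool.false_eq_true, if_false] at hx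
      obtain ⟨h, tt, hs⟩ := List.exists_cons_of_ne_nil (List.splitOnP_ne_nil (· == c) t)
      rw [hs] at hx
      simp at hx
      rcases hx with h1 | h1
      · subst h1
        intro hmem
        rcases List.mem_cons.mp hmem with h2 | h2
        · exact hac h2.symm
        · exact ih _ (by rw [hs]; exact List.mem_cons_self) h2
      · exact ih x (by rw [hs]; exact List.mem_cons_of_mem _ h1)

theorem pv_splitOn_ne_nil (c : Char) (s : List Char) : s.splitOn c ≠ [] :=
  List.splitOnP_ne_nil _ s

-- ---- whitespace facts ----

theorem pv_rstrip_cons {x : Char} (t : List Char) (hx : PySem.Chars.isspace x = false) :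
    PySem.Chars.rstrip (x :: t) = x :: PySem.Chars.rstrip t := by
  simp only [PySem.Chars.rstrip, List.reverse_cons]
  rw [List.dropWhile_append]
  by_cases h : (t.reverse.dropWhile PySem.Chars.isspace).isEmpty
  · simp [List.dropWhile, hx, List.isEmpty_iff.mp h]
  · simp [h]

theorem pv_lstrip_cons_nows {x : Char} (t : List Char) (hx : PySem.Chars.isspace x = false) :
    PySem.Chars.lstrip (x :: t) = x :: t := by
  simp [PySem.Chars.lstrip, List.dropWhile, hx]

theorem pv_strip_cons {x : Char} (t : List Char) (hx : PySem.Chars.isspace x = false) :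
    PySem.Chars.strip (x :: t) = x :: PySem.Chars.rstrip t := by
  rw [PySem.Chars.strip, pv_lstrip_cons_nows t hx, pv_rstrip_cons t hx]

theorem pv_lstrip_shape (s : List Char) :
    PySem.Chars.lstrip s = [] ∨
      ∃ x t, PySem.Chars.lstrip s = x :: t ∧ PySem.Chars.isspace x = false := by
  induction s with
  | nil => exact Or.inl rfl
  | cons a t ih =>
    by_cases ha : PySem.Chars.isspace a
    · simpa [PySem.Chars.lstrip, List.dropWhile, ha] using ih
    · exact Or.inr ⟨a, t, by simp [PySem.Chars.lstrip, List.dropWhile, ha], by simpa using ha⟩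

theorem pv_strip_shape (p : List Char) (h : PySem.Chars.strip p ≠ []) :
    ∃ x t, PySem.Chars.strip p = x :: t ∧ PySem.Chars.isspace x = false := by
  rcases pv_lstrip_shape p with h0 | ⟨x, t, hs, hx⟩
  · exfalso
    apply h
    rw [PySem.Chars.strip, h0]
    rfl
  · exact ⟨x, PySem.Chars.rstrip t, by rw [PySem.Chars.strip, hs, pv_rstrip_cons t hx], hx⟩

def pvInd : List Char := List.replicate 4 ' '

theorem pv_lstrip_ind (s : List Char) :
    PySem.Chars.lstrip (pvInd ++ s) = PySem.Chars.lstrip s := by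
  simp only [PySem.Chars.lstrip, List.dropWhile_append]
  have : List.dropWhile PySem.Chars.isspace pvInd = [] := by decide
  simp [this]

theorem pv_lstrip_idem (s : List Char) :
    PySem.Chars.lstrip (PySem.Chars.lstrip s) = PySem.Chars.lstrip s := by
  rcases pv_lstrip_shape s with h | ⟨x, t, hs, hx⟩
  · rw [h]; rfl
  · rw [hs, pv_lstrip_cons_nows t hx]

def pvKeep (l : List Char) : Bool := !(PySem.Chars.strip l).isEmpty

theorem pv_keep_nil : pvKeep [] = false := by decide

theorem pv_keep_ind (line : List Char) :
    pvKeep (pvInd ++ PySem.Chars.lstrip line) = !(PySem.Chars.lstrip line).isEmpty := by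
  unfold pvKeep
  rw [PySem.Chars.strip, pv_lstrip_ind, pv_lstrip_idem]
  rcases pv_lstrip_shape line with h | ⟨x, t, hs, hx⟩
  · simp [h, PySem.Chars.rstrip]
  · rw [hs, pv_rstrip_cons t hx]; simp

-- ---- per-paragraph line lists ----

def pvLines (q : List Char) : List (List Char) :=
  ((q.splitOn '\n').map PySem.Chars.lstrip).headD [] ::
    ((q.splitOn '\n').map PySem.Chars.lstrip).tail.map (fun line => pvInd ++ line)

def pvKept (q : List Char) : List (List Char) :=
  (q.splitOn '\n').headD [] ::
    (((q.splitOn '\n').tail.map PySem.Chars.lstrip).filter (fun s => !s.isEmpty)).map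
      (fun s => pvInd ++ s)

def pvContrib (p : List Char) : List (List Char) :=
  if (PySem.Chars.strip p).isEmpty then [] else pvKept (PySem.Chars.strip p)

-- the head chunk of the split of a stripped, non-blank paragraph starts with a non-space char
theorem pv_head_chunk (p : List Char) (h : PySem.Chars.strip p ≠ []) :
    ∃ x t rest, PySem.Chars.isspace x = false ∧
      (PySem.Chars.strip p).splitOn '\n' = (x :: t) :: rest := by
  obtain ⟨x, t1, hq, hx⟩ := pv_strip_shape p h
  have hxc : (x == '\n') = false := by
    have hne : x ≠ '\n' := by
      intro he
      subst he
      have : PySem.Chars.isspace '\n' = true := by decide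
      simp [this] at hx
    simpa using hne
  obtain ⟨hh, tt, hs⟩ := List.exists_cons_of_ne_nil (pv_splitOn_ne_nil '\n' t1)
  refine ⟨x, hh, tt, hx, ?_⟩
  rw [hq]
  simp only [List.splitOn, List.splitOnP_cons, hxc, Bool.false_eq_true, if_false]
  simp only [List.splitOn] at hs
  rw [hs]
  simp

theorem pv_filter_lines (p : List Char) (h : PySem.Chars.strip p ≠ []) :
    (pvLines (PySem.Chars.strip p)).filter pvKeep = pvKept (PySem.Chars.strip p) := by
  obtain ⟨x, t, rest, hx, hs⟩ := pv_head_chunk p h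
  unfold pvLines pvKept
  rw [hs]
  simp only [List.map_cons, List.headD_cons, List.tail_cons]
  rw [pv_lstrip_cons_nows t hx]
  have hkeephead : pvKeep (x :: t) = true := by
    unfold pvKeep
    rw [pv_strip_cons t hx]; simp
  rw [List.filter_cons_of_pos hkeephead]
  congr 1
  rw [List.filter_map]
  congr 1
  refine List.filter_congr ?_
  intro s hsmem
  obtain ⟨line, hlm, rfl⟩ := List.mem_map.mp hsmem
  simpa [Function.comp] using pv_keep_ind line

-- lines produced for a paragraph contain no '\n'
theorem pv_lines_no_nl (p : List Char) (h : PySem.Chars.strip p ≠ []) :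
    ∀ l ∈ pvLines (PySem.Chars.strip p), ('\n') ∉ l := by
  obtain ⟨x, t, rest, hx, hs⟩ := pv_head_chunk p h
  intro l hl
  unfold pvLines at hl
  rw [hs] at hl
  simp only [List.map_cons, List.headD_cons, List.tail_cons] at hl
  rw [pv_lstrip_cons_nows t hx] at hl
  rcases List.mem_cons.mp hl with h1 | h1
  · subst h1
    exact pv_splitOn_no_sep '\n' _ _ (by rw [hs]; exact List.mem_cons_self)
  · obtain ⟨s, hsm, hval⟩ := List.mem_map.mp h1
    obtain ⟨line, hlm, hls⟩ := List.mem_map.mp hsm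
    subst hval; subst hls
    intro hmem
    rcases List.mem_append.mp hmem with h2 | h2
    · exact absurd h2 (by decide)
    · have h3 : ('\n') ∈ line :=
        (List.dropWhile_sublist _).mem h2
      exact pv_splitOn_no_sep '\n' _ line (by rw [hs]; exact List.mem_cons_of_mem _ hlm) h3

-- ---- interleaving of the '\n\n' join ----

def pvSepJoin : List (List (List Char)) → List (List Char)
  | [] => []
  | [L] => L
  | L :: M :: t => L ++ [] :: pvSepJoin (M :: t)

theorem pv_sepJoin_ne_nil : ∀ (Ls : List (List (List Char))), Ls ≠ [] →
    (∀ L ∈ Ls, L ≠ []) → pvSepJoin Ls ≠ [] := by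
  intro Ls
  cases Ls with
  | nil => intro h; exact absurd rfl h
  | cons L t =>
    cases t with
    | nil => intro _ h2; simpa [pvSepJoin] using h2 L (by simp)
    | cons M t2 =>
      intro _ h2
      simp only [pvSepJoin]
      intro hcon
      have := List.append_eq_nil_iff.mp hcon
      simp at this

theorem pv_join_append (c : Char) : ∀ (A B : List (List Char)), A ≠ [] → B ≠ [] →
    PySem.Chars.join [c] (A ++ B)
      = PySem.Chars.join [c] A ++ [c] ++ PySem.Chars.join [c] B := by
  intro A
  induction A with
  | nil => intro B h; exact absurd rfl h
  | cons a t ih =>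
    intro B _ hB
    cases t with
    | nil =>
      obtain ⟨b, bs, rfl⟩ := List.exists_cons_of_ne_nil hB
      simp [PySem.Chars.join_cons_cons, PySem.Chars.join_singleton]
    | cons a2 t2 =>
      simp only [List.cons_append]
      rw [PySem.Chars.join_cons_cons, PySem.Chars.join_cons_cons]
      have hih := ih B (by simp) hB
      simp only [List.cons_append] at hih
      rw [hih]
      simp

theorem pv_join2 (c : Char) : ∀ (Ls : List (List (List Char))), (∀ L ∈ Ls, L ≠ []) →
    PySem.Chars.join [c, c] (Ls.map (PySem.Chars.join [c]))
      = PySem.Chars.join [c] (pvSepJoin Ls) := by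
  intro Ls
  induction Ls with
  | nil => intro _; simp [pvSepJoin]
  | cons L t ih =>
    intro hne
    cases t with
    | nil => simp [pvSepJoin]
    | cons M t2 =>
      simp only [List.map_cons, pvSepJoin]
      rw [PySem.Chars.join_cons_cons]
      rw [show (L ++ [] :: pvSepJoin (M :: t2)) = L ++ ([[]] ++ pvSepJoin (M :: t2)) by simp]
      have hsep : pvSepJoin (M :: t2) ≠ [] :=
        pv_sepJoin_ne_nil (M :: t2) (by simp) (fun L' hL' => hne L' (List.mem_cons_of_mem _ hL'))
      rw [pv_join_append c L ([[]] ++ pvSepJoin (M :: t2)) (hne L List.mem_cons_self) (by simp)]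
      rw [pv_join_append c [[]] (pvSepJoin (M :: t2)) (by simp) hsep]
      rw [← ih (fun L' hL' => hne L' (List.mem_cons_of_mem _ hL'))]
      simp [PySem.Chars.join_singleton]

theorem pv_mem_sepJoin : ∀ (Ls : List (List (List Char))) (l : List Char),
    l ∈ pvSepJoin Ls → l = [] ∨ ∃ L ∈ Ls, l ∈ L := by
  intro Ls
  induction Ls with
  | nil => intro l hl; simp [pvSepJoin] at hl
  | cons L t ih =>
    cases t with
    | nil => intro l hl; exact Or.inr ⟨L, by simp, by simpa [pvSepJoin] using hl⟩
    | cons M t2 =>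
      intro l hl
      simp only [pvSepJoin, List.mem_append, List.mem_cons] at hl
      rcases hl with h | h | h
      · exact Or.inr ⟨L, by simp, h⟩
      · exact Or.inl h
      · rcases ih l h with h1 | ⟨L', hL', hl'⟩
        · exact Or.inl h1
        · exact Or.inr ⟨L', by simp [hL'], hl'⟩

theorem pv_filter_sepJoin (p : List Char → Bool) (hp : p [] = false) :
    ∀ (Ls : List (List (List Char))),
    (pvSepJoin Ls).filter p = (Ls.map (fun L => L.filter p)).flatten := by
  intro Ls
  induction Ls with
  | nil => simp [pvSepJoin]
  | cons L t ih =>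
    cases t with
    | nil => simp [pvSepJoin]
    | cons M t2 =>
      simp only [pvSepJoin, List.filter_append, List.filter_cons, hp, List.map_cons,
        List.flatten_cons] at ih ⊢
      simp [ih]

-- split of a '\n'-join of '\n'-free chunks recovers the chunks
theorem pv_splitOn_join (c : Char) (L : List (List Char)) (hne : L ≠ [])
    (hfree : ∀ l ∈ L, c ∉ l) :
    (PySem.Chars.join [c] L).splitOn c = L := by
  have : PySem.Chars.join [c] L = [c].intercalate L := rfl
  rw [this, List.splitOn_intercalate L c hfree hne]


-- ---- pipeline characterisations ----

theorem pv_pipeline (qs : List (List Char))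
    (hq : ∀ q ∈ qs, ∃ p, q = PySem.Chars.strip p ∧ PySem.Chars.strip p ≠ []) :
    PySem.Chars.join ['\n']
      ((PySem.Chars.splitOn
          (PySem.Chars.join ['\n', '\n']
            (qs.map (fun q => PySem.Chars.join ['\n'] (pvLines q)))) ['\n']).filter pvKeep)
      = PySem.Chars.join ['\n'] ((qs.map pvKept).flatten) := by
  rw [show (qs.map (fun q => PySem.Chars.join ['\n'] (pvLines q)))
        = (qs.map pvLines).map (PySem.Chars.join ['\n']) by rw [List.map_map]; rfl]
  rw [pv_join2 '\n' (qs.map pvLines) (by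
    intro L hL
    obtain ⟨q, _, rfl⟩ := List.mem_map.mp hL
    simp [pvLines])]
  rw [pv_splitOn_single]
  cases qs with
  | nil =>
    simp only [List.map_nil]
    rw [show pvSepJoin [] = [] from rfl,
        show PySem.Chars.join ['\n'] ([] : List (List Char)) = [] from rfl,
        List.splitOn_nil]
    simp [pv_keep_nil]
  | cons q0 t =>
    rw [pv_splitOn_join '\n' (pvSepJoin ((q0 :: t).map pvLines))
        (pv_sepJoin_ne_nil _ (by simp) (by
          intro L hL
          obtain ⟨q, _, rfl⟩ := List.mem_map.mp hL
          simp [pvLines]))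
        (by
          intro l hl
          rcases pv_mem_sepJoin _ l hl with rfl | ⟨L, hL, hlL⟩
          · simp
          · obtain ⟨q, hqm, rfl⟩ := List.mem_map.mp hL
            obtain ⟨p, rfl, hp⟩ := hq q hqm
            exact pv_lines_no_nl p hp l hlL)]
    rw [pv_filter_sepJoin pvKeep pv_keep_nil]
    rw [List.map_map]
    congr 2
    refine List.map_congr_left ?_
    intro q hqm
    obtain ⟨p, rfl, hp⟩ := hq q hqm
    exact pv_filter_lines p hp

theorem pv_A_char (poem : String) :
    print_hanging_indents poem
      = String.ofList (PySem.Chars.join ['\n']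
          (((((PySem.Chars.splitOn poem.toList ['\n', '\n']).filter
                (fun p => !(PySem.Chars.strip p).isEmpty)).map PySem.Chars.strip).map
              pvKept).flatten)) := by
  unfold print_hanging_indents
  simp only [PySem.List.foldl_append_singleton_eq_map, List.nil_append]
  congr 1
  rw [show (fun paragraph => PySem.Chars.join ['\n']
        (((PySem.Chars.splitOn paragraph ['\n']).map PySem.Chars.lstrip).headD [] ::
          (((PySem.Chars.splitOn paragraph ['\n']).map PySem.Chars.lstrip).drop 1).map
            (fun line => List.replicate INDENTS.toNat ' ' ++ line)))
      = (fun q => PySem.Chars.join ['\n'] (pvLines q)) by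
    funext q
    simp only [pv_splitOn_single, List.drop_one]
    rfl]
  exact pv_pipeline _ (by
    intro q hqm
    obtain ⟨p, hpm, rfl⟩ := List.mem_map.mp hqm
    have := (List.mem_filter.mp hpm).2
    exact ⟨p, rfl, by simpa using this⟩)

theorem pv_inner (ls0 : List (List Char)) (out : List (List Char)) :
    ls0.foldl (fun out line =>
        let s := PySem.Chars.lstrip line
        if s.isEmpty then out
        else out ++ [List.replicate INDENTS.toNat ' ' ++ s]) out
      = out ++ (ls0.filter (fun line => !(PySem.Chars.lstrip line).isEmpty)).map
          (fun line => pvInd ++ PySem.Chars.lstrip line) := by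
  have h : (fun (out : List (List Char)) line =>
        let s := PySem.Chars.lstrip line
        if s.isEmpty then out
        else out ++ [List.replicate INDENTS.toNat ' ' ++ s])
      = (fun out line =>
        if (!(PySem.Chars.lstrip line).isEmpty) = true
        then out ++ [(fun line => pvInd ++ PySem.Chars.lstrip line) line] else out) := by
    funext out line
    by_cases h1 : (PySem.Chars.lstrip line).isEmpty <;> simp [h1, pvInd, INDENTS]
  rw [h, PySem.List.foldl_append_if]

theorem pv_B_char (poem : String) :
    print_hanging_indents_alt poem
      = String.ofList (PySem.Chars.join ['\n']
          ((PySem.Chars.splitOn poem.toList ['\n', '\n']).flatMap pvContrib)) := by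
  unfold print_hanging_indents_alt
  have h : (fun (out : List (List Char)) p =>
        let sp := PySem.Chars.strip p
        if sp.isEmpty then out
        else
          let ls := PySem.Chars.splitOn sp ['\n']
          let out' := out ++ [ls.headD []]
          (ls.drop 1).foldl (fun out line =>
            let s := PySem.Chars.lstrip line
            if s.isEmpty then out
            else out ++ [List.replicate INDENTS.toNat ' ' ++ s]) out')
      = (fun out p => out ++ pvContrib p) := by
    funext out p
    by_cases h1 : (PySem.Chars.strip p).isEmpty
    · simp only [h1, if_true, pvContrib, List.append_nil]
    · simp only [h1, if_false, pvContrib, Bool.false_eq_true]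
      rw [pv_inner]
      rw [List.append_assoc]
      congr 1
      unfold pvKept
      rw [pv_splitOn_single, List.drop_one]
      rw [List.filter_map, List.map_map]
      rfl
  rw [h, PySem.List.foldl_append_eq_flatMap]
  rfl

theorem pv_flatMap_contrib (P : List (List Char)) :
    P.flatMap pvContrib
      = ((((P.filter (fun p => !(PySem.Chars.strip p).isEmpty)).map PySem.Chars.strip).map
            pvKept).flatten) := by
  induction P with
  | nil => rfl
  | cons p t ih =>
    by_cases h1 : (PySem.Chars.strip p).isEmpty
    · simp only [List.flatMap_cons, pvContrib, h1, if_true, List.nil_append, ih,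
        List.filter_cons, Bool.not_true, Bool.false_eq_true]
      rfl
    · simp only [List.flatMap_cons, pvContrib, h1, ih, List.filter_cons, Bool.not_false]
      simp

-- ===== VERDICT (by name: the statement is the Claim_ definition above) =====
theorem print_hanging_indents_spec : Claim_equal_print_hanging_indents := by
  intro poem _
  unfold Spec_print_hanging_indents
  rw [pv_A_char, pv_B_char, pv_flatMap_contrib]
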